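-- pv_equiv track=rewrite | github.com/DanielBok/aoc | 2019/d4.py | derive_numbers_part_2
-- ===== SOURCE A (Python) =====
-- puzzle_input = 359282, 820401
--
-- def derive_numbers(current: str, numbers: str):
--     if len(current) == 6:
--         if not (puzzle_input[0] <= int(current) <= puzzle_input[1]):
--             return []
--
--         if len(set(current)) == 6:
--             return []
--
--         return [current]
--
--     results = []
--     for i in range(len(numbers)):
--         results.extend(derive_numbers(current + numbers[i], numbers[i:]))
--
--     return results
--
-- def derive_numbers_part_2(numbers='3456789'):
--     candidates = derive_numbers('', numbers)
--     results = []
--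
--     for candidate in candidates:
--         count_map = {n: 0 for n in numbers}
--         for letter in candidate:
--             count_map[letter] += 1
--
--         for count in count_map.values():
--             if count == 2:
--                 results.append(candidate)
--                 break
--
--     return results
-- ===== SOURCE B (Python) =====
-- puzzle_input = 359282, 820401
--
-- def derive_numbers_part_2(numbers='3456789'):
--     # Breadth-first: grow all index-nondecreasing 6-char strings level by level,
--     # then keep those in range that contain a digit appearing exactly twice.
--     level = [(numbers, '')]
--     for _ in range(6):
--         level = [(rem[i:], pre + rem[i]) for rem, pre in level for i in range(len(rem))]
--     lo, hi = puzzle_input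
--     return [s for _, s in level
--             if lo <= int(s) <= hi and any(s.count(ch) == 2 for ch in s)]
-- ===== Notes on version B (the rewrite author's own statement) =====
-- stated objective: simpler
-- what changed: Replaces A's depth-first recursive generator plus a second pass that builds a per-candidate count dict and a redundant all-distinct pre-filter by a single breadth-first level iteration (6 comprehension steps growing (remainder, prefix) pairs) with one combined filter (range test and a character occurring exactly twice).
import Mathlib
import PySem

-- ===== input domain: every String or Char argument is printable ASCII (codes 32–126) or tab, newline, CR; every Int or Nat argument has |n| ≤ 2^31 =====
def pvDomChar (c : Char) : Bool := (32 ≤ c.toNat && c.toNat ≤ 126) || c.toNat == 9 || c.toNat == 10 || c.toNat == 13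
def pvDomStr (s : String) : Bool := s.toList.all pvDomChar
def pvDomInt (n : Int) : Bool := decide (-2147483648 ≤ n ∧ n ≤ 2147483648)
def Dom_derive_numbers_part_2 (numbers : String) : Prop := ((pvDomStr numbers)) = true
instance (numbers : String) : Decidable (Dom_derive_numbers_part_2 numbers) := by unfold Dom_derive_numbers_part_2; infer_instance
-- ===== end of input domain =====

-- B replaces A's depth-first recursion plus separate dict-counting pass by a single
-- breadth-first level iteration with one combined filter (objective: simpler).

-- ===== PORT A =====
-- base case of derive_numbers (len(current) == 6); int(current) raising ValueError is the
-- `none` branch (returns [], excluded by Pre_)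
def pvCheckA (current : List Char) : List (List Char) :=
  match PySem.Int.ofStr? (String.mk current) with
  | none => []
  | some v =>
    if ¬ (359282 ≤ v ∧ v ≤ 820401) then []
    else if (PySem.Set.ofList current).length == 6 then []
    else [current]

-- derive_numbers; fuel = 6 - len(current) on every actual call, so the fuel-0 branch is
-- never taken from derive_numbers_part_2's call derive_numbers('', numbers)
def pvDeriveA : Nat → List Char → List Char → List (List Char)
  | fuel, current, numbers =>
    if current.length == 6 then pvCheckA current
    else match fuel with
      | 0 => []
      | f+1 => (List.range numbers.length).foldl
          (fun results i => results ++ pvDeriveA f (current ++ [numbers.getD i ' ']) (numbers.drop i)) []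

def derive_numbers_part_2 (numbers : String) : List String :=
  let candidates := pvDeriveA 6 [] numbers.toList
  candidates.foldl (fun results candidate =>
    -- count_map = {n: 0 for n in numbers}; then count_map[letter] += 1 for each letter:
    -- every letter of a candidate is a character of numbers, so the KeyError branch of
    -- Python's `count_map[letter] += 1` is unreachable and modify (default 0) is exact
    let count_map : PySem.Dict Char Int :=
      candidate.foldl (fun d letter => d.modify letter 0 (fun x => x + 1))
        (numbers.toList.foldl (fun d n => d.insert n (0 : Int)) PySem.Dict.empty)
    -- for count in count_map.values(): if count == 2: append; break
    if count_map.values.any (fun c => c == 2) then results ++ [String.mk candidate]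
    else results) []

-- ===== PORT B =====
-- one level step: [(rem[i:], pre + rem[i]) for rem, pre in level for i in range(len(rem))]
def pvExt (lvl : List (List Char × List Char)) : List (List Char × List Char) :=
  lvl.flatMap (fun rp =>
    (List.range rp.1.length).map (fun i => (rp.1.drop i, rp.2 ++ [rp.1.getD i ' '])))

-- any(s.count(ch) == 2 for ch in s)
def pvHasPair (s : List Char) : Bool := s.any (fun ch => s.count ch == 2)

-- the final comprehension's condition; int(s) raising is the `none` branch (outside Pre_)
def pvCheckB (s : List Char) : Option String :=
  match PySem.Int.ofStr? (String.mk s) with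
  | none => none
  | some v =>
    if 359282 ≤ v ∧ v ≤ 820401 then (if pvHasPair s then some (String.mk s) else none)
    else none

def derive_numbers_part_2_alt (numbers : String) : List String :=
  let level := (List.range 6).foldl (fun l _ => pvExt l) [(numbers.toList, ([] : List Char))]
  level.filterMap (fun rp => pvCheckB rp.2)

-- ===== PRECONDITION & SPEC =====
-- Python A raises ValueError (int() on a 6-character candidate containing a non-digit)
-- exactly when numbers contains a non-digit character; Pre_ admits all digit strings.
def Pre_derive_numbers_part_2 (numbers : String) : Prop :=
  numbers.toList.all PySem.Str.isdigit = true
instance (numbers : String) : Decidable (Pre_derive_numbers_part_2 numbers) := by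
  unfold Pre_derive_numbers_part_2; infer_instance
def pvWitness_derive_numbers_part_2 : String := "3456789"

def Spec_derive_numbers_part_2 (numbers : String) (out : List String) : Prop := out = derive_numbers_part_2_alt numbers
instance (numbers : String) (out : List String) : Decidable (Spec_derive_numbers_part_2 numbers out) := by unfold Spec_derive_numbers_part_2; infer_instance

-- ===== CLAIM (what is proved, stated in full; the proofs are below) =====
def Claim_equal_derive_numbers_part_2 : Prop := ∀ (numbers : String), Dom_derive_numbers_part_2 numbers → Pre_derive_numbers_part_2 numbers → Spec_derive_numbers_part_2 numbers (derive_numbers_part_2 numbers)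

-- ===== LEMMAS AND PROOFS =====

-- unfolding pvDeriveA one step below length 6
theorem pvDeriveA_step (f : Nat) (current numbers : List Char) (h : current.length ≠ 6) :
    pvDeriveA (f+1) current numbers =
      (List.range numbers.length).flatMap
        (fun i => pvDeriveA f (current ++ [numbers.getD i ' ']) (numbers.drop i)) := by
  rw [pvDeriveA]
  simp [h, List.flatMap]

theorem pvDeriveA_base (f : Nat) (current numbers : List Char) (h : current.length = 6) :
    pvDeriveA f current numbers = pvCheckA current := by
  rw [pvDeriveA.eq_def]; simp [h]

-- one BFS level step absorbs one DFS recursion level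
theorem flatMap_pvExt (f : Nat) (lvl : List (List Char × List Char))
    (hlen : ∀ rp ∈ lvl, rp.2.length + 1 ≤ 6) :
    lvl.flatMap (fun rp => pvDeriveA (f+1) rp.2 rp.1) =
      (pvExt lvl).flatMap (fun rp => pvDeriveA f rp.2 rp.1) := by
  unfold pvExt
  rw [List.flatMap_assoc]
  apply List.flatMap_congr
  intro rp hrp
  rw [pvDeriveA_step f rp.2 rp.1 (by have := hlen rp hrp; omega), List.flatMap_map]

-- the full correspondence: k more levels to go
theorem pvDeriveA_levels (k : Nat) (f : Nat) (lvl : List (List Char × List Char))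
    (hlen : ∀ rp ∈ lvl, rp.2.length + k = 6) (hf : k ≤ f) :
    lvl.flatMap (fun rp => pvDeriveA f rp.2 rp.1) =
      (pvExt^[k] lvl).flatMap (fun rp => pvCheckA rp.2) := by
  induction k generalizing f lvl with
  | zero =>
    simp only [Function.iterate_zero, id]
    apply List.flatMap_congr
    intro rp hrp
    exact pvDeriveA_base f rp.2 rp.1 (by have := hlen rp hrp; omega)
  | succ k ih =>
    obtain ⟨f', rfl⟩ : ∃ f', f = f' + 1 := ⟨f - 1, by omega⟩
    rw [flatMap_pvExt f' lvl (fun rp h => by have := hlen rp h; omega)]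
    rw [ih (f := f') (pvExt lvl) ?_ (by omega)]
    · rw [Function.iterate_succ_apply]
    · intro rp hrp
      unfold pvExt at hrp
      simp only [List.mem_flatMap, List.mem_map, List.mem_range] at hrp
      obtain ⟨q, hq, i, hi, rfl⟩ := hrp
      have := hlen q hq
      simp; omega

-- every pair in the BFS levels has prefix and remainder drawn from numbers
theorem pvExt_chars (ns : List Char) (lvl : List (List Char × List Char))
    (h : ∀ rp ∈ lvl, (∀ c ∈ rp.1, c ∈ ns) ∧ (∀ c ∈ rp.2, c ∈ ns)) :
    ∀ rp ∈ pvExt lvl, (∀ c ∈ rp.1, c ∈ ns) ∧ (∀ c ∈ rp.2, c ∈ ns) := by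
  intro rp hrp
  unfold pvExt at hrp
  simp only [List.mem_flatMap, List.mem_map, List.mem_range] at hrp
  obtain ⟨q, hq, i, hi, rfl⟩ := hrp
  obtain ⟨h1, h2⟩ := h q hq
  refine ⟨fun c hc => h1 c (List.mem_of_mem_drop hc), ?_⟩
  intro c hc
  simp only [List.mem_append, List.mem_singleton] at hc
  rcases hc with hc | rfl
  · exact h2 c hc
  · have hi' : i < q.1.length := by simpa using hi
    have hg : q.1.getD i ' ' = q.1[i] := by simp [List.getD, List.getElem?_eq_getElem hi']
    rw [hg]
    exact h1 _ (List.getElem_mem hi')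

theorem pvLevels_chars (ns : List Char) (k : Nat) :
    ∀ rp ∈ pvExt^[k] [(ns, ([] : List Char))], (∀ c ∈ rp.1, c ∈ ns) ∧ (∀ c ∈ rp.2, c ∈ ns) := by
  induction k with
  | zero => simp
  | succ k ih => rw [Function.iterate_succ_apply']; exact pvExt_chars ns _ ih

-- after k level steps every prefix has length k
theorem pvLevels_len (ns : List Char) (k : Nat) :
    ∀ rp ∈ pvExt^[k] [(ns, ([] : List Char))], rp.2.length = k := by
  induction k with
  | zero => simp
  | succ k ih =>
    rw [Function.iterate_succ_apply']
    intro rp hrp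
    unfold pvExt at hrp
    simp only [List.mem_flatMap, List.mem_map, List.mem_range] at hrp
    obtain ⟨q, hq, i, hi, rfl⟩ := hrp
    have := ih q hq
    simp; omega

-- the base dict {n: 0 for n in numbers} has every value 0
theorem pvGetD_init (ns : List Char) (d : PySem.Dict Char Int) (h : ∀ k, d.getD k 0 = 0) :
    ∀ k, (ns.foldl (fun d n => d.insert n 0) d).getD k 0 = 0 := by
  induction ns generalizing d with
  | nil => exact h
  | cons c ns ih =>
    refine ih _ (fun k => ?_)
    simp [PySem.Dict.getD, PySem.Dict.get?_insert]
    split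
    · rfl
    · simpa [PySem.Dict.getD] using h k

-- Set.update adds nothing when every element is already present
theorem pvSet_update_subset (s : PySem.Set Char) (l : List Char) (h : ∀ c ∈ l, c ∈ s) :
    PySem.Set.update s l = s := by
  induction l generalizing s with
  | nil => rfl
  | cons c l ih =>
    have hc : PySem.Set.contains s c = true := by
      simp [PySem.Set.contains, List.contains_eq_mem, h c (by simp)]
    show PySem.Set.update (PySem.Set.add s c) l = s
    rw [PySem.Set.add, hc]
    · exact ih s (fun x hx => h x (by simp [hx]))

-- A's count_map test equals B's per-character test (candidate chars ⊆ numbers)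
theorem pvPair_eq (ns pre : List Char) (hsub : ∀ c ∈ pre, c ∈ ns) :
    ((pre.foldl (fun d letter => d.modify letter 0 (fun x => x + 1))
        (ns.foldl (fun d n => d.insert n (0 : Int)) PySem.Dict.empty)).values.any
      (fun c => c == 2)) = pvHasPair pre := by
  set base := ns.foldl (fun d n => d.insert n (0 : Int)) PySem.Dict.empty with hbase
  have hkeys : (pre.foldl (fun d letter => d.modify letter 0 (fun x => x + 1)) base).keys
      = PySem.Set.ofList ns := by
    rw [PySem.Dict.keys_foldl_modify]
    have h1 : base.keys = PySem.Set.ofList ns := by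
      rw [hbase, PySem.Dict.keys_foldl_insert]
      rfl
    rw [h1, pvSet_update_subset _ _ (fun c hc => (PySem.Set.mem_ofList ns c).2 (hsub c hc))]
  have hnd : (pre.foldl (fun d letter => d.modify letter 0 (fun x => x + 1)) base).keys.Nodup := by
    rw [hkeys]; exact PySem.Set.nodup_ofList ns
  rw [PySem.Dict.values_eq_map_keys _ hnd 0, hkeys]
  have hval : ∀ k, (pre.foldl (fun d letter => d.modify letter 0 (fun x => x + 1)) base).getD k 0
      = (pre.count k : Int) := by
    intro k
    rw [PySem.Dict.getD_foldl_modify_add_one, pvGetD_init ns PySem.Dict.empty (fun _ => rfl) k]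
    simp
  unfold pvHasPair
  rw [Bool.eq_iff_iff]
  simp only [List.any_map, List.any_eq_true, Function.comp]
  constructor
  · rintro ⟨k, hk, h2⟩
    rw [hval] at h2
    have hc : (pre.count k : Int) = 2 := by simpa using h2
    have hc' : pre.count k = 2 := by exact_mod_cast hc
    exact ⟨k, List.count_pos_iff.1 (by omega), by simp [hc']⟩
  · rintro ⟨c, hc, h2⟩
    refine ⟨c, (PySem.Set.mem_ofList ns c).2 (hsub c hc), ?_⟩
    rw [hval]
    have hc' : pre.count c = 2 := by simpa using h2
    simp only [beq_iff_eq]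
    exact_mod_cast hc'

-- a 6-character candidate with all characters distinct has no pair
theorem pvNoPair_of_distinct (pre : List Char)
    (h6 : (PySem.Set.ofList pre).length = pre.length) : pvHasPair pre = false := by
  have hnd : pre.Nodup := by
    have hdl : pre.dedup.length = pre.length := by
      have h1 : (PySem.Set.ofList pre).toFinset.card = (PySem.Set.ofList pre).length :=
        List.toFinset_card_of_nodup (PySem.Set.nodup_ofList pre)
      have h2 : (PySem.Set.ofList pre).toFinset = pre.toFinset := by
        ext c; simp [List.mem_toFinset, PySem.Set.mem_ofList]
      have h3 := List.card_toFinset pre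
      have h4 := (List.dedup_sublist pre).length_le
      rw [h2] at h1
      omega
    exact List.dedup_eq_self.1 ((List.dedup_sublist pre).eq_of_length hdl)
  unfold pvHasPair
  rw [List.any_eq_false]
  intro c _
  have := List.nodup_iff_count_le_one.1 hnd c
  simp; omega

-- pointwise: A's candidate filter + pair filter = B's combined check
theorem pvPointwise (ns pre : List Char) (hsub : ∀ c ∈ pre, c ∈ ns) (hlen : pre.length = 6) :
    ((pvCheckA pre).filter (fun candidate =>
        ((candidate.foldl (fun d letter => d.modify letter 0 (fun x => x + 1))
            (ns.foldl (fun d n => d.insert n (0 : Int)) PySem.Dict.empty)).values.any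
          (fun c => c == 2)))).map String.mk = (pvCheckB pre).toList := by
  have hpair := pvPair_eq ns pre hsub
  unfold pvCheckA pvCheckB
  cases hs : PySem.Int.ofStr? (String.mk pre) with
  | none => simp
  | some v =>
    by_cases hr : 359282 ≤ v ∧ v ≤ 820401
    · by_cases h6 : (PySem.Set.ofList pre).length = 6
      · have hnp : pvHasPair pre = false := pvNoPair_of_distinct pre (by rw [hlen, h6])
        simp [hr, h6, hnp]
      · cases hhp : pvHasPair pre with
        | true => simp [hr, h6, List.filter, hpair, hhp]
        | false => simp [hr, h6, List.filter, hpair, hhp]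
    · simp [hr]

-- filterMap via flatMap of Option.toList
theorem pvFilterMap_eq (l : List (List Char × List Char)) (g : List Char → Option String) :
    l.filterMap (fun rp => g rp.2) = l.flatMap (fun rp => (g rp.2).toList) := by
  induction l with
  | nil => rfl
  | cons x l ih => cases h : g x.2 <;> simp [h, ih]

-- ===== VERDICT (by name: the statement is the Claim_ definition above) =====
theorem derive_numbers_part_2_spec : Claim_equal_derive_numbers_part_2 := by
  intro numbers _ _
  show derive_numbers_part_2 numbers = derive_numbers_part_2_alt numbers
  unfold derive_numbers_part_2 derive_numbers_part_2_alt
  set ns := numbers.toList with hns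
  have hlvl : (List.range 6).foldl (fun l _ => pvExt l) [(ns, ([] : List Char))]
      = pvExt^[6] [(ns, ([] : List Char))] := by
    show (List.range 6).foldl (fun l _ => pvExt l) [(ns, [])] = _
    simp [List.range_succ, Function.iterate_succ_apply']
  have hder : pvDeriveA 6 [] ns
      = (pvExt^[6] [(ns, ([] : List Char))]).flatMap (fun rp => pvCheckA rp.2) := by
    have := pvDeriveA_levels 6 6 [(ns, ([] : List Char))] (by simp) (le_refl 6)
    simpa using this
  simp only [hder, hlvl, pvFilterMap_eq]
  have hfold := PySem.List.foldl_append_if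
    (fun candidate => ((candidate.foldl (fun d letter => d.modify letter 0 (fun x => x + 1))
      (ns.foldl (fun d n => d.insert n (0 : Int)) PySem.Dict.empty)).values.any (fun c => c == 2)))
    String.mk (List.flatMap (fun rp => pvCheckA rp.2) (pvExt^[6] [(ns, ([] : List Char))])) []
  simp only [List.nil_append] at hfold
  rw [hfold, List.filter_flatMap, List.map_flatMap]
  apply List.flatMap_congr
  intro rp hrp
  exact pvPointwise ns rp.2 (pvLevels_chars ns 6 rp hrp).2 (pvLevels_len ns 6 rp hrp)
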